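-- pv_equiv track=rewrite | github.com/sklesde/commande-intelligente | predict_keywords.py | parse_input_line
-- ===== SOURCE A (Python) =====
-- from typing import Dict, Iterable, List, Sequence, Set, Tuple
--
-- def parse_input_line(raw: str) -> List[str]:
--     """Découpe une ligne utilisateur en tokens, séparés par '&' et ','."""
--     tokens: List[str] = []
--     for part in raw.split("&"):
--         for sub in part.split(","):
--             val = sub.strip()
--             if val:
--                 tokens.append(val)
--     return tokens
-- ===== SOURCE B (Python) =====
-- def parse_input_line(raw):
--     """Single-pass scanner: accumulate chars, flush the buffer at each delimiter."""
--     tokens = []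
--     buf = []
--     for ch in raw:
--         if ch == "&" or ch == ",":
--             val = "".join(buf).strip()
--             if val:
--                 tokens.append(val)
--             buf = []
--         else:
--             buf.append(ch)
--     val = "".join(buf).strip()
--     if val:
--         tokens.append(val)
--     return tokens
-- ===== Notes on version B (the rewrite author's own statement) =====
-- stated objective: alternative
-- what changed: Replaced the two-level nested split ('&' outer, ',' inner) plus per-piece strip/filter by a single character-level scan that accumulates a buffer and flushes a stripped token at each delimiter.
import Mathlib
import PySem

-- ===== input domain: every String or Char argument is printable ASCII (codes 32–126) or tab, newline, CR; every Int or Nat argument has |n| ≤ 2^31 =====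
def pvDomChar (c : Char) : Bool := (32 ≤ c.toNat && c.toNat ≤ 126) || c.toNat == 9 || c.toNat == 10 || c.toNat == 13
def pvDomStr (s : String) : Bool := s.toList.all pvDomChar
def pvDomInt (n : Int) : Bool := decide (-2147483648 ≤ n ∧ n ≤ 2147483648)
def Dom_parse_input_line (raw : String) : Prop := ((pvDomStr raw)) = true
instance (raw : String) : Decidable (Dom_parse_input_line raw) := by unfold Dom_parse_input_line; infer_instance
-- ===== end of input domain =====

-- B replaces the nested split ('&' outer, ',' inner) with a single character scan that
-- flushes a stripped buffer at each delimiter; same cost, different decomposition.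

-- ===== PORT A =====
-- raw.split("&") / part.split(",") : the separators are the non-empty literals "&" and ",",
-- so PySem.Str.split? is always `some`; `.getD []` only totalizes and is never taken.
def parse_input_line (raw : String) : List String :=
  ((PySem.Str.split? raw "&").getD []).foldl
    (fun tokens part =>
      ((PySem.Str.split? part ",").getD []).foldl
        (fun tokens sub =>
          let val := PySem.Str.strip sub
          if val ≠ "" then tokens ++ [val] else tokens)
        tokens)
    []

-- ===== PORT B =====
-- flush: val = "".join(buf).strip(); if val: tokens.append(val)
def pvFlush (tokens : List String) (buf : List Char) : List String :=
  let val := PySem.Str.strip (String.ofList buf)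
  if val ≠ "" then tokens ++ [val] else tokens

def parse_input_line_alt (raw : String) : List String :=
  let st := raw.toList.foldl
    (fun (st : List String × List Char) ch =>
      if ch = '&' ∨ ch = ',' then (pvFlush st.1 st.2, [])
      else (st.1, st.2 ++ [ch]))
    ([], [])
  pvFlush st.1 st.2

-- ===== PRECONDITION & SPEC =====
def Spec_parse_input_line (raw : String) (out : List String) : Prop := out = parse_input_line_alt raw
instance (raw : String) (out : List String) : Decidable (Spec_parse_input_line raw out) := by unfold Spec_parse_input_line; infer_instance

-- ===== CLAIM (what is proved, stated in full; the proofs are below) =====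
def Claim_equal_parse_input_line : Prop := ∀ (raw : String), Dom_parse_input_line raw → Spec_parse_input_line raw (parse_input_line raw)

-- ===== LEMMAS AND PROOFS =====

-- single-char split, accumulator form (mirrors PySem.Chars.splitOn.go for sep = [a])
def pvSpl (a : Char) : List Char → List Char → List (List Char)
  | [], cur => [cur.reverse]
  | c :: cs, cur => if c = a then cur.reverse :: pvSpl a cs [] else pvSpl a cs (c :: cur)

lemma pvGo_eq (a : Char) : ∀ (fuel : Nat) (l cur acc : _), l.length ≤ fuel →
    PySem.Chars.splitOn.go [a] fuel l cur acc = acc.reverse ++ pvSpl a l cur := by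
  intro fuel
  induction fuel with
  | zero =>
    intro l cur acc h
    have hl : l = [] := by cases l <;> simp_all
    subst hl
    simp [PySem.Chars.splitOn.go, pvSpl]
  | succ f ih =>
    intro l cur acc h
    cases l with
    | nil => simp [PySem.Chars.splitOn.go, pvSpl]
    | cons c rest =>
      by_cases hc : c = a
      · subst hc
        simp only [PySem.Chars.splitOn.go, List.isPrefixOf, BEq.rfl, Bool.true_and,
          if_true, List.length_cons, List.drop_succ_cons, List.length_nil, List.drop_zero]
        rw [ih rest [] (cur.reverse :: acc) (by simpa using h)]
        simp [pvSpl]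
      · have hba : (([a] : List Char).isPrefixOf (c :: rest)) = false := by
          simp [List.isPrefixOf]
          exact fun hh => absurd hh.symm hc
        simp only [PySem.Chars.splitOn.go, hba, Bool.false_eq_true, if_false]
        rw [ih rest (c :: cur) acc (by simpa using h)]
        simp [pvSpl, hc]

lemma pvSplitOn_single (a : Char) (l : List Char) :
    PySem.Chars.splitOn l [a] = pvSpl a l [] := by
  unfold PySem.Chars.splitOn
  rw [pvGo_eq a (l.length + 1) l [] [] (by omega)]
  simp

lemma pvSpl_cur (a : Char) (l : List Char) : ∀ cur,
    pvSpl a l cur = (pvSpl a l []).modifyHead (cur.reverse ++ ·) := by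
  induction l with
  | nil => intro cur; simp [pvSpl]
  | cons c cs ih =>
    intro cur
    by_cases hc : c = a
    · simp [pvSpl, hc]
    · simp only [pvSpl, hc, if_false]
      rw [ih (c :: cur), ih [c], List.modifyHead_modifyHead]
      congr 1
      funext x
      simp

lemma pvSpl_cons (a c : Char) (cs : List Char) :
    pvSpl a (c :: cs) [] =
      if c = a then [] :: pvSpl a cs [] else (pvSpl a cs []).modifyHead (c :: ·) := by
  by_cases hc : c = a
  · simp [pvSpl, hc]
  · simp only [pvSpl, hc, if_false]
    rw [pvSpl_cur a cs [c]]
    congr 1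

lemma pvSpl_ne_nil (a : Char) (l : List Char) : ∀ cur, pvSpl a l cur ≠ [] := by
  induction l with
  | nil => intro cur; simp [pvSpl]
  | cons c cs ih =>
    intro cur
    by_cases hc : c = a
    · simp [pvSpl, hc]
    · simp only [pvSpl, hc, if_false]
      exact ih _

-- the combined split on either delimiter, which B's scan computes
def pvS2 : List Char → List (List Char)
  | [] => [[]]
  | c :: cs => if c = '&' ∨ c = ',' then [] :: pvS2 cs else (pvS2 cs).modifyHead (c :: ·)

lemma pvModifyHead_append {α : Type} (f : α → α) (l₁ l₂ : List α) (h : l₁ ≠ []) :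
    (l₁ ++ l₂).modifyHead f = l₁.modifyHead f ++ l₂ := by
  cases l₁ with
  | nil => exact absurd rfl h
  | cons x xs => simp

lemma pvFlat (cs : List Char) :
    (pvSpl '&' cs []).flatMap (fun p => pvSpl ',' p []) = pvS2 cs := by
  induction cs with
  | nil => simp [pvSpl, pvS2]
  | cons c cs ih =>
    rw [pvSpl_cons]
    by_cases hamp : c = '&'
    · simp only [hamp, if_true, List.flatMap_cons, ih, pvS2]
      simp [pvSpl]
    · simp only [hamp, if_false]
      obtain ⟨h, t, hht⟩ := List.exists_cons_of_ne_nil (pvSpl_ne_nil '&' cs [])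
      have hih : pvSpl ',' h [] ++ t.flatMap (fun p => pvSpl ',' p []) = pvS2 cs := by
        rw [← ih, hht]; simp
      by_cases hcm : c = ','
      · subst hcm
        rw [hht]
        simp only [List.modifyHead_cons, List.flatMap_cons, pvSpl_cons, if_true, pvS2]
        simp [← hih]
      · rw [hht]
        simp only [List.modifyHead_cons, List.flatMap_cons, pvSpl_cons, hcm, if_false]
        have h2 : pvS2 (c :: cs) = (pvS2 cs).modifyHead (c :: ·) := by
          simp [pvS2, hamp, hcm]
        rw [h2, ← hih, pvModifyHead_append _ _ _ (pvSpl_ne_nil ',' h [])]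

-- the common target: fold the filtered, stripped pieces onto `tokens`
def pvF (tokens : List String) (L : List (List Char)) : List String :=
  L.foldl
    (fun t s =>
      if PySem.Chars.strip s ≠ [] then t ++ [String.ofList (PySem.Chars.strip s)] else t)
    tokens

lemma pvStrip_ofList (s : List Char) :
    PySem.Str.strip (String.ofList s) = String.ofList (PySem.Chars.strip s) := by
  have h := PySem.Str.toList_strip (String.ofList s)
  rw [String.toList_ofList] at h
  rw [← String.ofList_toList (s := PySem.Str.strip (String.ofList s)), h]

lemma pvOfList_ne_empty (s : List Char) : (String.ofList s ≠ "") ↔ s ≠ [] := by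
  constructor
  · intro h hs; exact h (by simp [hs])
  · intro h hh
    exact h (by simpa using congrArg String.toList hh)

lemma pvSplit_getD (s sep : String) (h : sep.toList ≠ []) :
    (PySem.Str.split? s sep).getD [] =
      (PySem.Chars.splitOn s.toList sep.toList).map String.ofList := by
  have hm := PySem.Str.split?_map s sep
  cases hx : PySem.Str.split? s sep with
  | none =>
    rw [hx] at hm
    simp [PySem.Chars.split?, List.isEmpty_iff, h] at hm
  | some P =>
    rw [hx] at hm
    simp only [PySem.Chars.split?, List.isEmpty_iff, h, if_false, Option.map_some,
      Option.some.injEq] at hm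
    simp only [Option.getD_some, ← hm, List.map_map]
    have : String.ofList ∘ String.toList = id := by
      funext x; simp [String.ofList_toList]
    simp [this]

lemma pvInnerFold (p : List Char) (tokens : List String) :
    ((PySem.Str.split? (String.ofList p) ",").getD []).foldl
      (fun tokens sub =>
        let val := PySem.Str.strip sub
        if val ≠ "" then tokens ++ [val] else tokens)
      tokens = pvF tokens (pvSpl ',' p []) := by
  rw [pvSplit_getD _ "," (by decide)]
  have hsep : ("," : String).toList = [','] := by decide
  rw [hsep, String.toList_ofList, pvSplitOn_single, List.foldl_map]
  unfold pvF
  congr 1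
  funext t s
  simp only [pvStrip_ofList, pvOfList_ne_empty]

lemma pvA_eq (raw : String) : parse_input_line raw = pvF [] (pvS2 raw.toList) := by
  unfold parse_input_line
  rw [pvSplit_getD _ "&" (by decide)]
  have hsep : ("&" : String).toList = ['&'] := by decide
  rw [hsep, pvSplitOn_single, List.foldl_map]
  have hstep :
      (fun (tokens : List String) (p : List Char) =>
        ((PySem.Str.split? (String.ofList p) ",").getD []).foldl
          (fun tokens sub =>
            let val := PySem.Str.strip sub
            if val ≠ "" then tokens ++ [val] else tokens)
          tokens)
      = fun tokens p => pvF tokens (pvSpl ',' p []) := by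
    funext tokens p; exact pvInnerFold p tokens
  rw [hstep]
  have := @List.foldl_flatMap (List Char) (List Char) (List String)
    (fun p => pvSpl ',' p [])
    (fun t s =>
      if PySem.Chars.strip s ≠ [] then t ++ [String.ofList (PySem.Chars.strip s)] else t)
    (pvSpl '&' raw.toList []) []
  unfold pvF
  rw [← this, pvFlat]

lemma pvFlush_eq (tokens : List String) (buf : List Char) :
    pvFlush tokens buf =
      if PySem.Chars.strip buf ≠ [] then tokens ++ [String.ofList (PySem.Chars.strip buf)]
      else tokens := by
  unfold pvFlush
  simp only [pvStrip_ofList, pvOfList_ne_empty]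

lemma pvModifyHead_nil_append {α : Type} (l : List (List α)) :
    l.modifyHead (([] : List α) ++ ·) = l := by
  cases l <;> simp

lemma pvB_loop (cs : List Char) : ∀ (tokens : List String) (buf : List Char),
    (let st := cs.foldl
        (fun (st : List String × List Char) ch =>
          if ch = '&' ∨ ch = ',' then (pvFlush st.1 st.2, [])
          else (st.1, st.2 ++ [ch]))
        (tokens, buf)
     pvFlush st.1 st.2) = pvF tokens ((pvS2 cs).modifyHead (buf ++ ·)) := by
  induction cs with
  | nil =>
    intro tokens buf
    simp only [List.foldl_nil, pvS2, List.modifyHead_cons, List.append_nil]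
    rw [pvFlush_eq]
    unfold pvF
    simp
  | cons c cs ih =>
    intro tokens buf
    by_cases hc : c = '&' ∨ c = ','
    · simp only [List.foldl_cons, hc, if_true]
      rw [ih (pvFlush tokens buf) [], pvModifyHead_nil_append]
      simp only [pvS2, hc, if_true, List.modifyHead_cons, List.append_nil]
      unfold pvF
      rw [List.foldl_cons, pvFlush_eq]
    · simp only [List.foldl_cons, hc, if_false]
      rw [ih tokens (buf ++ [c])]
      simp only [pvS2, hc, if_false, List.modifyHead_modifyHead]
      congr 2
      funext x
      simp

lemma pvB_eq (raw : String) : parse_input_line_alt raw = pvF [] (pvS2 raw.toList) := by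
  unfold parse_input_line_alt
  rw [pvB_loop raw.toList [] [], pvModifyHead_nil_append]

-- ===== VERDICT (by name: the statement is the Claim_ definition above) =====
theorem parse_input_line_spec : Claim_equal_parse_input_line := by
  intro raw _
  unfold Spec_parse_input_line
  rw [pvA_eq, pvB_eq]
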